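-- pv_equiv track=rewrite | github.com/EkaterinaKugot/Computer_vision | figs_different_shades/main.py | clustering
-- ===== SOURCE A (Python) =====
-- def clustering(colors):
--     clusters = []
--     while colors:
--         color1 = colors.pop(0)
--         clusters.append([color1])
--         for color2 in colors.copy():
--             if abs(color1 - color2) < 5:
--                 clusters[-1].append(color2)
--                 colors.pop(colors.index(color2))
--     return clusters
-- ===== SOURCE B (Python) =====
-- def clustering(colors):
--     # One forward pass: each color joins the first existing cluster whose
--     # seed (= the cluster's first element) is within 5, else starts a new cluster.
--     # (Unlike A, this does not mutate the input list.)
--     clusters = []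
--     for x in colors:
--         for cl in clusters:
--             if abs(cl[0] - x) < 5:
--                 cl.append(x)
--                 break
--         else:
--             clusters.append([x])
--     return clusters
-- ===== Notes on version B (the rewrite author's own statement) =====
-- stated objective: simpler
-- what changed: Replaces A's destructive while-loop (pop(0), copy(), index()/pop() removals from the shared list) with one forward pass that appends each color to the first existing cluster whose seed is within 5, so the input list is never mutated.
import Mathlib
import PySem

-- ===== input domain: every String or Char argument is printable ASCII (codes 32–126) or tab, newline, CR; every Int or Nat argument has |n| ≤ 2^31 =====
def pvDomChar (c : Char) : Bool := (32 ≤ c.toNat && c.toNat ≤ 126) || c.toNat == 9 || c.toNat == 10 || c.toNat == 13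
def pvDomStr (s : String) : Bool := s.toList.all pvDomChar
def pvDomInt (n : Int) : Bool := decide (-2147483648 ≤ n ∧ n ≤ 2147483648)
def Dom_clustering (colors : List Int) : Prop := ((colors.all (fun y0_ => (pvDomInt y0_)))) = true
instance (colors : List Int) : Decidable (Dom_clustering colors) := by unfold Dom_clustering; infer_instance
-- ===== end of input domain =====

-- B re-implements A as one non-mutating forward pass over the colors (A empties its
-- argument list in place; B leaves it unchanged — the equivalence is about the return value).

-- ===== PORT A =====
-- one step of A's inner `for color2 in colors.copy()` loop; state = (current cluster, colors)
-- `colors.pop(colors.index(color2))` removes the first occurrence of color2 = PySem.List.remove?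
-- (it is never `none` inside A's loop, since color2 was drawn from a copy of colors; the
--  `none => st.2` arm is unreachable)
def clusteringInner (color1 : Int) (st : List Int × List Int) (color2 : Int) :
    List Int × List Int :=
  if |color1 - color2| < 5 then
    (st.1 ++ [color2],
     match PySem.List.remove? st.2 color2 with
     | some l => l
     | none => st.2)
  else st

theorem clusteringInner_len (color1 : Int) (st : List Int × List Int) (color2 : Int) :
    (clusteringInner color1 st color2).2.length ≤ st.2.length := by
  unfold clusteringInner
  split
  · by_cases h : color2 ∈ st.2
    · simp only
      rw [PySem.List.remove?_eq_some_erase _ _ h]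
      simpa using List.length_erase_le
    · simp only
      rw [(PySem.List.remove?_eq_none_iff _ _).2 h]
  · exact le_refl _

theorem clusteringInner_foldl_len (color1 : Int) (l : List Int) (st : List Int × List Int) :
    (l.foldl (clusteringInner color1) st).2.length ≤ st.2.length := by
  induction l generalizing st with
  | nil => exact le_refl _
  | cons x t ih => exact le_trans (ih _) (clusteringInner_len color1 st x)

-- A's inner for-loop, run from `color1` popped in front of `rest`
def clusterStep (color1 : Int) (rest : List Int) : List Int × List Int :=
  rest.foldl (clusteringInner color1) ([color1], rest)

-- A's `while colors:` loop, carrying `clusters`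
def clusteringLoop : List Int → List (List Int) → List (List Int)
  | [], clusters => clusters
  | color1 :: rest, clusters =>
    -- colors.pop(0); clusters.append([color1]); inner loop; continue on what is left
    clusteringLoop (clusterStep color1 rest).2 (clusters ++ [(clusterStep color1 rest).1])
termination_by colors _ => colors.length
decreasing_by
  simp only [List.length_cons]
  exact Nat.lt_succ_of_le (clusteringInner_foldl_len color1 rest ([color1], rest))

def clustering (colors : List Int) : List (List Int) :=
  clusteringLoop colors []

-- ===== PORT B =====
-- append x to the first cluster whose seed (= first element) is within 5, else open a new one
-- (clusters are never empty, so Python's `cl[0]` is ported as `cl.headD 0`)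
def placeB (x : Int) : List (List Int) → List (List Int)
  | [] => [[x]]
  | cl :: rest =>
    if |cl.headD 0 - x| < 5 then (cl ++ [x]) :: rest
    else cl :: placeB x rest

def clustering_alt (colors : List Int) : List (List Int) :=
  colors.foldl (fun clusters x => placeB x clusters) []

-- ===== PRECONDITION & SPEC =====
def Spec_clustering (colors : List Int) (out : List (List Int)) : Prop := out = clustering_alt colors
instance (colors : List Int) (out : List (List Int)) : Decidable (Spec_clustering colors out) := by unfold Spec_clustering; infer_instance

-- ===== CLAIM (what is proved, stated in full; the proofs are below) =====
def Claim_equal_clustering : Prop := ∀ (colors : List Int), Dom_clustering colors → Spec_clustering colors (clustering colors)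

-- ===== LEMMAS AND PROOFS =====

-- STEP 1: A's inner fold partitions the remaining colors by |color1 - ·| < 5.
theorem inner_fold_char (c : Int) (l r acc : List Int)
    (hr : ∀ a ∈ r, ¬ |c - a| < 5) :
    l.foldl (clusteringInner c) (acc, r ++ l) =
      (acc ++ l.filter (fun a => decide (|c - a| < 5)),
       r ++ l.filter (fun a => !decide (|c - a| < 5))) := by
  induction l generalizing r acc with
  | nil => simp
  | cons x t ih =>
    by_cases hx : |c - x| < 5
    · have hxr : x ∉ r := fun hmem => hr x hmem hx
      have hrem : PySem.List.remove? (r ++ x :: t) x = some (r ++ t) := by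
        induction r with
        | nil => simp
        | cons b rb ihr =>
          have hb : b ≠ x := fun h => hxr (h ▸ List.mem_cons_self)
          rw [List.cons_append, PySem.List.remove?_cons_of_ne _ hb,
            ihr (fun a ha => hr a (List.mem_cons_of_mem b ha))
              (fun h => hxr (List.mem_cons_of_mem b h))]
          rfl
      have hstep : clusteringInner c (acc, r ++ x :: t) x = (acc ++ [x], r ++ t) := by
        simp [clusteringInner, hx, hrem]
      rw [List.foldl_cons, hstep, ih r (acc ++ [x]) hr]
      simp [hx]
    · have hstep : clusteringInner c (acc, r ++ x :: t) x = (acc, r ++ x :: t) := by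
        simp [clusteringInner, hx]
      have hr' : ∀ a ∈ r ++ [x], ¬ |c - a| < 5 := by
        intro a ha
        rcases List.mem_append.1 ha with h | h
        · exact hr a h
        · simp at h; subst h; exact hx
      rw [List.foldl_cons, hstep]
      have := ih (r ++ [x]) acc hr'
      rw [List.append_assoc, List.singleton_append] at this
      rw [this]
      simp [hx]

-- the clean recursion that A computes
def simpleA : List Int → List (List Int)
  | [] => []
  | c :: rest =>
    (c :: rest.filter (fun a => decide (|c - a| < 5))) ::
      simpleA (rest.filter (fun a => !decide (|c - a| < 5)))
termination_by l => l.length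
decreasing_by
  simp only [List.length_cons, List.length_unattach]
  exact Nat.lt_succ_of_le (le_trans (List.length_filter_le _ _) (by simp))

-- STEP 2: A's loop computes `clusters ++ simpleA colors`.
theorem clusteringLoop_eq (colors : List Int) (clusters : List (List Int)) :
    clusteringLoop colors clusters = clusters ++ simpleA colors := by
  induction hn : colors.length using Nat.strong_induction_on generalizing colors clusters with
  | _ n ih =>
    match colors with
    | [] => simp [clusteringLoop, simpleA]
    | c :: rest =>
      rw [clusteringLoop]
      have hfold := inner_fold_char c rest [] [c] (by intro a ha; simp at ha)
      simp only [List.nil_append] at hfold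
      unfold clusterStep
      rw [hfold]
      have hlen : (rest.filter (fun a => !decide (|c - a| < 5))).length < n := by
        subst hn
        simp only [List.length_cons]
        exact Nat.lt_succ_of_le (List.length_filter_le _ _)
      rw [ih _ hlen _ _ rfl, simpleA]
      simp

-- STEP 3: B's fold, started with a first cluster seeded by `cl.headD 0`, splits the same way.
theorem foldPlace_cons (l : List Int) (cl : List Int) (C : List (List Int))
    (hcl : cl ≠ []) :
    l.foldl (fun clusters x => placeB x clusters) (cl :: C) =
      (cl ++ l.filter (fun a => decide (|cl.headD 0 - a| < 5))) ::
        (l.filter (fun a => !decide (|cl.headD 0 - a| < 5))).foldl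
          (fun clusters x => placeB x clusters) C := by
  induction l generalizing cl C with
  | nil => simp
  | cons x t ih =>
    by_cases hx : |cl.headD 0 - x| < 5
    · have hstep : placeB x (cl :: C) = (cl ++ [x]) :: C := by
        simp only [placeB]; rw [if_pos hx]
      have hhd : (cl ++ [x]).headD 0 = cl.headD 0 := by
        cases cl with
        | nil => exact absurd rfl hcl
        | cons a b => simp
      rw [List.foldl_cons, hstep, ih (cl ++ [x]) C (by simp), hhd,
        List.filter_cons, List.filter_cons, if_pos (decide_eq_true hx)]
      rw [decide_eq_true hx]
      simp [List.append_assoc]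
    · have hstep : placeB x (cl :: C) = cl :: placeB x C := by
        simp only [placeB]; rw [if_neg hx]
      rw [List.foldl_cons, hstep, ih cl (placeB x C) hcl,
        List.filter_cons, List.filter_cons, decide_eq_false hx]
      simp

-- STEP 4: B computes simpleA too.
theorem alt_eq_simpleA (colors : List Int) : clustering_alt colors = simpleA colors := by
  unfold clustering_alt
  induction hn : colors.length using Nat.strong_induction_on generalizing colors with
  | _ n ih =>
    match colors with
    | [] => simp [simpleA]
    | c :: rest =>
      rw [List.foldl_cons]
      have h0 : placeB c [] = [[c]] := rfl
      rw [h0, foldPlace_cons rest [c] [] (by simp)]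
      have hlen : (rest.filter (fun a => !decide (|c - a| < 5))).length < n := by
        subst hn
        simp only [List.length_cons]
        exact Nat.lt_succ_of_le (List.length_filter_le _ _)
      have := ih _ hlen (rest.filter (fun a => !decide (|c - a| < 5))) rfl
      rw [simpleA, List.singleton_append]
      simp only [List.headD]
      exact congrArg (List.cons _) this

-- ===== VERDICT (by name: the statement is the Claim_ definition above) =====
theorem clustering_spec : Claim_equal_clustering := by
  intro colors _
  unfold Spec_clustering clustering
  rw [clusteringLoop_eq, alt_eq_simpleA]
  simp
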